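-- pv_equiv track=rewrite | github.com/weelzo/AgentWorks | src/agentworks/memory.py | _split_preserved
-- ===== SOURCE A (Python) =====
-- from typing import Any, Protocol, runtime_checkable
--
-- def _split_preserved(
--     messages: list[dict[str, Any]]
-- ) -> tuple[list[dict[str, Any]], list[dict[str, Any]]]:
--     """
--     Split messages into preserved (never evicted) and trimmable.
--
--     Preserved: system messages + first user message.
--     Trimmable: everything else.
--     """
--     preserved = []
--     trimmable = []
--     first_user_found = False
--
--     for msg in messages:
--         if msg.get("role") == "system":
--             preserved.append(msg)
--         elif msg.get("role") == "user" and not first_user_found: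
--             preserved.append(msg)
--             first_user_found = True
--         else:
--             trimmable.append(msg)
--
--     return preserved, trimmable
-- ===== SOURCE B (Python) =====
-- def _split_preserved(messages):
--     """Index-first classification: find the first user index, then classify by
--     role/index in two comprehensions (no running flag)."""
--     first_user_idx = next(
--         (i for i, m in enumerate(messages) if m.get("role") == "user"), None
--     )
--     preserved = [
--         m for i, m in enumerate(messages)
--         if m.get("role") == "system" or i == first_user_idx
--     ]
--     trimmable = [
--         m for i, m in enumerate(messages)
--         if not (m.get("role") == "system" or i == first_user_idx)
--     ]
--     return preserved, trimmable
-- ===== Notes on version B (the rewrite author's own statement) =====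
-- stated objective: alternative
-- what changed: Replaces the single stateful loop with a running first_user_found flag by index-first classification: precompute the first user index with next(enumerate(...)), then build preserved and trimmable with two index-based comprehensions.
import Mathlib
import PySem

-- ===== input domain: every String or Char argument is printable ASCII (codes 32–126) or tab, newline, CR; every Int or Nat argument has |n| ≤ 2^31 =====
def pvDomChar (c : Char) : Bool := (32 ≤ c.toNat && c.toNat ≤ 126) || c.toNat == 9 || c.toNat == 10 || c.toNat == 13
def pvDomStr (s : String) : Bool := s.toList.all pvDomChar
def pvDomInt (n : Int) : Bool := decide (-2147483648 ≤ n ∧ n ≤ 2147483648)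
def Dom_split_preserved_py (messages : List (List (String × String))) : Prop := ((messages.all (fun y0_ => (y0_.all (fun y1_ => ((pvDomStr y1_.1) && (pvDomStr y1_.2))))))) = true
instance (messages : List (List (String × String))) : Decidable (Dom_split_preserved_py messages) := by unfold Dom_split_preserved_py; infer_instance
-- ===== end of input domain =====

-- B replaces A's stateful loop (running first_user_found flag) by index-first
-- classification: precompute the first user index, then two filtering passes
-- over the enumerated list; objective: alternative decomposition, same cost.

-- msg.get("role"): first-match lookup in the association list (= dict.get, None default)
def pvRole (msg : List (String × String)) : Option String :=
  (msg.find? (fun kv => kv.1 == "role")).map (·.2)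

-- ===== PORT A =====
def split_preserved_py (messages : List (List (String × String))) : (List (List (String × String))) × (List (List (String × String))) :=
  let r := messages.foldl
    (fun (st : List (List (String × String)) × List (List (String × String)) × Bool) msg =>
      if pvRole msg == some "system" then (st.1 ++ [msg], st.2.1, st.2.2)
      else if pvRole msg == some "user" && !st.2.2 then (st.1 ++ [msg], st.2.1, true)
      else (st.1, st.2.1 ++ [msg], st.2.2))
    ([], [], false)
  (r.1, r.2.1)

-- ===== PORT B =====
def split_preserved_py_alt (messages : List (List (String × String))) : (List (List (String × String))) × (List (List (String × String))) :=
  let first_user_idx : Option Int :=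
    ((PySem.List.enumerate messages).find? (fun p => pvRole p.2 == some "user")).map (·.1)
  let preserved :=
    ((PySem.List.enumerate messages).filter
      (fun p => pvRole p.2 == some "system" || some p.1 == first_user_idx)).map (·.2)
  let trimmable :=
    ((PySem.List.enumerate messages).filter
      (fun p => !(pvRole p.2 == some "system" || some p.1 == first_user_idx))).map (·.2)
  (preserved, trimmable)

-- ===== PRECONDITION & SPEC =====
def Spec_split_preserved_py (messages : List (List (String × String))) (out : (List (List (String × String))) × (List (List (String × String)))) : Prop := out = split_preserved_py_alt messages
instance (messages : List (List (String × String))) (out : (List (List (String × String))) × (List (List (String × String)))) : Decidable (Spec_split_preserved_py messages out) := by unfold Spec_split_preserved_py; infer_instance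

-- ===== CLAIM (what is proved, stated in full; the proofs are below) =====
def Claim_equal_split_preserved_py : Prop := ∀ (messages : List (List (String × String))), Dom_split_preserved_py messages → Spec_split_preserved_py messages (split_preserved_py messages)

-- ===== LEMMAS AND PROOFS =====

-- canonical structural splitting, a common reference point for both ports
def pvIsSys (m : List (String × String)) : Bool := pvRole m == some "system"
def pvIsUser (m : List (String × String)) : Bool := pvRole m == some "user"

def pvCanonP : List (List (String × String)) → List (List (String × String))
  | [] => []
  | m :: ms =>
    if pvIsSys m then m :: pvCanonP ms
    else if pvIsUser m then m :: ms.filter pvIsSys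
    else pvCanonP ms

def pvCanonT : List (List (String × String)) → List (List (String × String))
  | [] => []
  | m :: ms =>
    if pvIsSys m then pvCanonT ms
    else if pvIsUser m then ms.filter (fun x => !pvIsSys x)
    else m :: pvCanonT ms

lemma pv_sys_not_user {m : List (String × String)} (h : pvIsSys m = true) : pvIsUser m = false := by
  simp [pvIsSys] at h
  simp [pvIsUser, h]

-- A's loop step function, named so the fold lemmas can rewrite it cleanly
def pvStepA (st : List (List (String × String)) × List (List (String × String)) × Bool)
    (msg : List (String × String)) :
    List (List (String × String)) × List (List (String × String)) × Bool :=
  if pvRole msg == some "system" then (st.1 ++ [msg], st.2.1, st.2.2)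
  else if pvRole msg == some "user" && !st.2.2 then (st.1 ++ [msg], st.2.1, true)
  else (st.1, st.2.1 ++ [msg], st.2.2)

lemma pvStepA_eq (st msg) :
    (fun (st : List (List (String × String)) × List (List (String × String)) × Bool) msg =>
      if pvRole msg == some "system" then (st.1 ++ [msg], st.2.1, st.2.2)
      else if pvRole msg == some "user" && !st.2.2 then (st.1 ++ [msg], st.2.1, true)
      else (st.1, st.2.1 ++ [msg], st.2.2)) st msg = pvStepA st msg := rfl

lemma pvStepA_sys {msg} (h : pvIsSys msg = true) (st) :
    pvStepA st msg = (st.1 ++ [msg], st.2.1, st.2.2) := by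
  simp [pvStepA, pvIsSys] at h ⊢; simp [h]

lemma pvStepA_user_false {msg} (hs : pvIsSys msg = false) (hu : pvIsUser msg = true)
    (p t : List (List (String × String))) :
    pvStepA (p, t, false) msg = (p ++ [msg], t, true) := by
  simp [pvIsSys] at hs; simp [pvIsUser] at hu
  simp [pvStepA, hs, hu]

lemma pvStepA_other {msg} (hs : pvIsSys msg = false) (hu : pvIsUser msg = false)
    (p t : List (List (String × String))) (b : Bool) :
    pvStepA (p, t, b) msg = (p, t ++ [msg], b) := by
  simp [pvIsSys] at hs; simp [pvIsUser] at hu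
  simp [pvStepA, hs, hu]

lemma pvStepA_true {msg} (hs : pvIsSys msg = false)
    (p t : List (List (String × String))) :
    pvStepA (p, t, true) msg = (p, t ++ [msg], true) := by
  simp [pvIsSys] at hs
  simp [pvStepA, hs]

-- A's loop, flag already true: the rest splits by role == "system"
lemma pv_foldA_true (ms : List (List (String × String))) :
    ∀ p t, ms.foldl pvStepA (p, t, true)
      = (p ++ ms.filter pvIsSys, t ++ ms.filter (fun x => !pvIsSys x), true) := by
  induction ms with
  | nil => simp
  | cons m ms ih =>
    intro p t
    rw [List.foldl_cons]
    by_cases hs : pvIsSys m = true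
    · rw [pvStepA_sys hs, ih]
      simp [List.filter_cons, hs]
    · rw [pvStepA_true (Bool.eq_false_iff.2 hs), ih]
      simp [List.filter_cons, hs]

-- A's loop, flag still false: it computes the canonical splitting
lemma pv_foldA_false (ms : List (List (String × String))) :
    ∀ p t, ms.foldl pvStepA (p, t, false)
      = (p ++ pvCanonP ms, t ++ pvCanonT ms, ms.any pvIsUser) := by
  induction ms with
  | nil => simp [pvCanonP, pvCanonT]
  | cons m ms ih =>
    intro p t
    rw [List.foldl_cons]
    by_cases hs : pvIsSys m = true
    · have hu := pv_sys_not_user hs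
      rw [pvStepA_sys hs, ih]
      simp [pvCanonP, pvCanonT, hs, List.any_cons, hu]
    · have hs' := Bool.eq_false_iff.2 hs
      by_cases hu : pvIsUser m = true
      · rw [pvStepA_user_false hs' hu, pv_foldA_true]
        simp [pvCanonP, pvCanonT, hs, hu, List.any_cons]
      · have hu' := Bool.eq_false_iff.2 hu
        rw [pvStepA_other hs' hu', ih]
        simp [pvCanonP, pvCanonT, hs, hu', List.any_cons]

lemma pvA_eq_canon (ms : List (List (String × String))) :
    split_preserved_py ms = (pvCanonP ms, pvCanonT ms) := by
  show ((ms.foldl _ ([], [], false)).1, (ms.foldl _ ([], [], false)).2.1)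
      = (pvCanonP ms, pvCanonT ms)
  have h : ms.foldl
      (fun (st : List (List (String × String)) × List (List (String × String)) × Bool) msg =>
        if pvRole msg == some "system" then (st.1 ++ [msg], st.2.1, st.2.2)
        else if pvRole msg == some "user" && !st.2.2 then (st.1 ++ [msg], st.2.1, true)
        else (st.1, st.2.1 ++ [msg], st.2.2)) ([], [], false)
      = ms.foldl pvStepA ([], [], false) := by
    exact congrFun (congrFun (congrArg List.foldl (funext fun st => funext fun msg => pvStepA_eq st msg)) ([], [], false)) ms
  rw [h, pv_foldA_false ms [] []]
  simp

-- every index produced by enumerate from start s is ≥ s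
lemma pv_enum_ge {ms : List (List (String × String))} {s : Int}
    {p : Int × List (String × String)} (h : p ∈ PySem.List.enumerate ms s) : s ≤ p.1 := by
  rcases (PySem.List.mem_enumerate_iff _ _ _).1 h with ⟨k, hk, rfl⟩
  simp

-- tail filters with the pure "system" predicate
lemma pv_filter_sys (ms : List (List (String × String))) :
    ∀ s : Int, ((PySem.List.enumerate ms s).filter (fun p => pvIsSys p.2)).map (·.2)
      = ms.filter pvIsSys := by
  induction ms with
  | nil => simp [PySem.List.enumerate_nil]
  | cons m ms ih =>
    intro s
    by_cases hs : pvIsSys m = true <;>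
      simp [PySem.List.enumerate_cons, List.filter_cons, hs, ih]

lemma pv_filter_nsys (ms : List (List (String × String))) :
    ∀ s : Int, ((PySem.List.enumerate ms s).filter (fun p => !pvIsSys p.2)).map (·.2)
      = ms.filter (fun x => !pvIsSys x) := by
  induction ms with
  | nil => simp [PySem.List.enumerate_nil]
  | cons m ms ih =>
    intro s
    by_cases hs : pvIsSys m = true <;>
      simp [PySem.List.enumerate_cons, List.filter_cons, hs, ih]

-- B's generalized computation from any start index equals the canonical splitting
lemma pvB_gen (ms : List (List (String × String))) :
    ∀ s : Int,
      (((PySem.List.enumerate ms s).filter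
        (fun p => pvIsSys p.2 ||
          some p.1 == ((PySem.List.enumerate ms s).find? (fun q => pvIsUser q.2)).map (·.1))).map (·.2)
        = pvCanonP ms)
      ∧ (((PySem.List.enumerate ms s).filter
        (fun p => !(pvIsSys p.2 ||
          some p.1 == ((PySem.List.enumerate ms s).find? (fun q => pvIsUser q.2)).map (·.1)))).map (·.2)
        = pvCanonT ms) := by
  induction ms with
  | nil => simp [PySem.List.enumerate_nil, pvCanonP, pvCanonT]
  | cons m ms ih =>
    intro s
    rw [PySem.List.enumerate_cons]
    by_cases hu : pvIsUser m = true
    · -- first user is here: fui = some s; tail indices never match s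
      have hs : pvIsSys m = false := by
        simp [pvIsUser] at hu; simp [pvIsSys, hu]
      have hfind : ((s, m) :: PySem.List.enumerate ms (s + 1)).find?
          (fun q => pvIsUser q.2) = some (s, m) := by
        simp [hu]
      have htail : ∀ p ∈ PySem.List.enumerate ms (s+1), (some p.1 == some s) = false := by
        intro p hp
        have := pv_enum_ge hp
        simp only [Bool.eq_false_iff, ne_eq, beq_iff_eq, Option.some.injEq]
        omega
      have hc1 : (PySem.List.enumerate ms (s+1)).filter (fun p => pvIsSys p.2 || some p.1 == some s)
          = (PySem.List.enumerate ms (s+1)).filter (fun p => pvIsSys p.2) :=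
        List.filter_congr (by intro p hp; simp [htail p hp])
      have hc2 : (PySem.List.enumerate ms (s+1)).filter (fun p => !pvIsSys p.2 && !(some p.1 == some s))
          = (PySem.List.enumerate ms (s+1)).filter (fun p => !pvIsSys p.2) :=
        List.filter_congr (by intro p hp; simp [htail p hp])
      rw [hfind]
      constructor
      · simp only [List.filter_cons, Option.map_some, hs, Bool.false_or, beq_self_eq_true,
          Bool.or_true]
        rw [if_pos trivial]
        simp only [List.map_cons, hc1, pv_filter_sys]
        simp [pvCanonP, hs, hu]
      · simp only [List.filter_cons, Option.map_some, hs, Bool.false_or, beq_self_eq_true,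
          Bool.or_true, Bool.not_true, Bool.not_or]
        rw [if_neg (by simp)]
        rw [hc2, pv_filter_nsys]
        simp [pvCanonT, hs, hu]
    · -- head is not user: fui comes from the tail; head matches iff it is system
      have hu' : pvIsUser m = false := Bool.eq_false_iff.2 hu
      have hfind : ((s, m) :: PySem.List.enumerate ms (s + 1)).find?
          (fun q => pvIsUser q.2)
          = (PySem.List.enumerate ms (s+1)).find? (fun q => pvIsUser q.2) := by
        simp [hu']
      have hhead : (some s == ((PySem.List.enumerate ms (s+1)).find? (fun q => pvIsUser q.2)).map (·.1)) = false := by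
        rcases hf : (PySem.List.enumerate ms (s+1)).find? (fun q => pvIsUser q.2) with _ | q
        · rw [hf]; rfl
        · have hq := pv_enum_ge (List.mem_of_find?_eq_some hf)
          rw [hf]
          simp only [Option.map_some, Bool.eq_false_iff, ne_eq, beq_iff_eq, Option.some.injEq]
          omega
      have hih := ih (s+1)
      rw [hfind]
      constructor
      · rw [List.filter_cons]
        by_cases hs : pvIsSys m = true
        · rw [if_pos (by simp [hs]), List.map_cons, hih.1]
          simp [pvCanonP, hs]
        · rw [if_neg (by simp [hs, hhead]), hih.1]
          simp [pvCanonP, hs, hu']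
      · rw [List.filter_cons]
        by_cases hs : pvIsSys m = true
        · rw [if_neg (by simp [hs]), hih.2]
          simp [pvCanonT, hs]
        · rw [if_pos (by simp [hs, hhead]), List.map_cons, hih.2]
          simp [pvCanonT, hs, hu']

lemma pvB_eq_canon (ms : List (List (String × String))) :
    split_preserved_py_alt ms = (pvCanonP ms, pvCanonT ms) := by
  have h := pvB_gen ms 0
  simp only [split_preserved_py_alt]
  exact Prod.ext h.1 h.2

-- ===== VERDICT (by name: the statement is the Claim_ definition above) =====
theorem split_preserved_py_spec : Claim_equal_split_preserved_py := by
  intro ms _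
  show split_preserved_py ms = split_preserved_py_alt ms
  rw [pvA_eq_canon, pvB_eq_canon]
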